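-- pv_equiv track=rewrite | github.com/mclement18/python-scripts-bio | RAST2BRIG.py | splitbysubsys
-- ===== SOURCE A (Python) =====
-- def splitbysubsys(L, sub, sens):
--     reformL = []
--     if sens == "forward":
--         deco = "clockwise-arrow\n"
--     elif sens == "reverse":
--         deco = "counterclockwise-arrow\n"
--     for item in L:
--         elements = item.split("\t")
--         if int(elements[3]) - int(elements[4]) < 0:
--             nelements = [elements[3], elements[4], elements[8], deco, elements[9]]
--         else:
--             nelements = [elements[4], elements[3], elements[8], deco, elements[9]]
--         nitem = "\t".join(nelements)
--         reformL.append(nitem)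
--
--     classL = {}
--     s2c = {}
--     n = 0
--     c = ["gray", "fuchsia", "teal", "purple", "orange", "olive", "silver", "navy", "lime", "marron", "yellow", "aqua", "green"]
--     for s in sub:
--         classL[s] = []
--         s2c[s] = c[n]
--         n += 1
--     for item in reformL:
--         st = item.split("\t")[4]
--         nelements = item.split("\t")[:-1]
--         nitem = "\t".join([nelements[0], nelements[1], nelements[2], s2c[st], nelements[3]])
--         classL[st].append(nitem)
--
--     return classL
-- ===== SOURCE B (Python) =====
-- def splitbysubsys(L, sub, sens):
--     if sens == "forward":
--         deco = "clockwise-arrow\n"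
--     elif sens == "reverse":
--         deco = "counterclockwise-arrow\n"
--     c = ["gray", "fuchsia", "teal", "purple", "orange", "olive", "silver", "navy", "lime", "marron", "yellow", "aqua", "green"]
--     classL = {}
--     s2c = {}
--     for n, s in enumerate(sub):
--         classL[s] = []
--         s2c[s] = c[n]
--     for item in L:
--         e = item.split("\t")
--         if int(e[3]) - int(e[4]) < 0:
--             start, end = e[3], e[4]
--         else:
--             start, end = e[4], e[3]
--         key = e[9]
--         classL[key].append("\t".join([start, end, e[8], s2c[key], deco]))
--     return classL
-- ===== Notes on version B (the rewrite author's own statement) =====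
-- stated objective: simpler
-- what changed: B classifies each line in a single pass that builds the final record directly from the split fields, eliminating A's intermediate reformL list and its re-join/re-split of every line.
import Mathlib
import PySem

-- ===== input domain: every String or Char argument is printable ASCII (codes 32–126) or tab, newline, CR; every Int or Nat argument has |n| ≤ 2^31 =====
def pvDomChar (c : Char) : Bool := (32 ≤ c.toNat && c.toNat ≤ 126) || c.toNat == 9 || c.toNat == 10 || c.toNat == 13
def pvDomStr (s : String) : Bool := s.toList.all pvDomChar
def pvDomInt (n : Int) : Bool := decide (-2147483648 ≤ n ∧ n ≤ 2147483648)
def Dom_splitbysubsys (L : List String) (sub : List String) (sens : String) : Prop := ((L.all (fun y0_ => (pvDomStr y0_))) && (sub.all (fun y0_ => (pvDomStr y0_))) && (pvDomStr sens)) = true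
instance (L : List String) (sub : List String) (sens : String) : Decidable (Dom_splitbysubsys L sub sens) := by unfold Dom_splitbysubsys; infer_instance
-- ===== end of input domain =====

-- B reclassifies each line in ONE pass, building the final record directly from the split
-- fields; A's intermediate reformL list and its re-join/re-split of every line disappear (objective: simpler).

-- ===== PORT A =====
def pvColors : List String := ["gray", "fuchsia", "teal", "purple", "orange", "olive", "silver", "navy", "lime", "marron", "yellow", "aqua", "green"]

-- item.split("\t"); the .getD [] is never taken (the separator is non-empty)
def pvSplitTab (s : String) : List String := (PySem.Str.split? s "\t").getD []

def splitbysubsys (L : List String) (sub : List String) (sens : String) : List (String × List String) :=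
  -- Python's if/elif leaves 'deco' unbound for any other sens (NameError when used; Pre_ excludes that); "" is a dummy
  let deco : String := if sens = "forward" then "clockwise-arrow\n" else if sens = "reverse" then "counterclockwise-arrow\n" else ""
  let reformL : List String := L.foldl (fun acc item =>
    let elements := pvSplitTab item
    let nelements :=
      if (PySem.Int.ofStr? (PySem.List.pyGetD elements 3 "")).getD 0 - (PySem.Int.ofStr? (PySem.List.pyGetD elements 4 "")).getD 0 < 0 then
        [PySem.List.pyGetD elements 3 "", PySem.List.pyGetD elements 4 "", PySem.List.pyGetD elements 8 "", deco, PySem.List.pyGetD elements 9 ""]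
      else
        [PySem.List.pyGetD elements 4 "", PySem.List.pyGetD elements 3 "", PySem.List.pyGetD elements 8 "", deco, PySem.List.pyGetD elements 9 ""]
    acc ++ [PySem.Str.join "\t" nelements]) ([] : List String)
  let built := sub.foldl
    (fun acc s => (acc.1.insert s ([] : List String), acc.2.1.insert s (PySem.List.pyGetD pvColors acc.2.2 ""), acc.2.2 + 1))
    ((PySem.Dict.empty : PySem.Dict String (List String)), (PySem.Dict.empty : PySem.Dict String String), (0 : Int))
  let classL := reformL.foldl (fun cl item =>
    let st := PySem.List.pyGetD (pvSplitTab item) 4 ""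
    let nelements := PySem.List.slice (pvSplitTab item) none (some (-1))
    let nitem := PySem.Str.join "\t" [PySem.List.pyGetD nelements 0 "", PySem.List.pyGetD nelements 1 "",
      PySem.List.pyGetD nelements 2 "", built.2.1.getD st "", PySem.List.pyGetD nelements 3 ""]
    cl.modify st [] (fun v => v ++ [nitem])) built.1
  classL.items

-- ===== PORT B =====
def splitbysubsys_alt (L : List String) (sub : List String) (sens : String) : List (String × List String) :=
  -- same NameError corner as A (Pre_ excludes it); "" is a dummy
  let deco : String := if sens = "forward" then "clockwise-arrow\n" else if sens = "reverse" then "counterclockwise-arrow\n" else ""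
  let c : List String := ["gray", "fuchsia", "teal", "purple", "orange", "olive", "silver", "navy", "lime", "marron", "yellow", "aqua", "green"]
  let dicts := (PySem.List.enumerate sub 0).foldl
    (fun acc p => (acc.1.insert p.2 ([] : List String), acc.2.insert p.2 (PySem.List.pyGetD c p.1 "")))
    ((PySem.Dict.empty : PySem.Dict String (List String)), (PySem.Dict.empty : PySem.Dict String String))
  let classL := L.foldl (fun cl item =>
    let e := (PySem.Str.split? item "\t").getD []
    let se :=
      if (PySem.Int.ofStr? (PySem.List.pyGetD e 3 "")).getD 0 - (PySem.Int.ofStr? (PySem.List.pyGetD e 4 "")).getD 0 < 0 then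
        (PySem.List.pyGetD e 3 "", PySem.List.pyGetD e 4 "")
      else
        (PySem.List.pyGetD e 4 "", PySem.List.pyGetD e 3 "")
    let key := PySem.List.pyGetD e 9 ""
    cl.modify key [] (fun v => v ++ [PySem.Str.join "\t" [se.1, se.2, PySem.List.pyGetD e 8 "", dicts.2.getD key "", deco]])) dicts.1
  classL.items

-- ===== PRECONDITION & SPEC =====
-- Pre_ excludes exactly the inputs where Python A raises: an unbound 'deco' (NameError) when some line
-- must be decorated, more than 13 subsystems (IndexError on the colour list), a line with fewer than 10
-- tab fields (IndexError), a non-integer start/end field (ValueError), or a subsystem key absent from sub (KeyError).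
def Pre_splitbysubsys (L : List String) (sub : List String) (sens : String) : Prop :=
  sub.length ≤ 13 ∧ (L = [] ∨ sens = "forward" ∨ sens = "reverse") ∧
  ∀ item ∈ L,
    10 ≤ ((PySem.Str.split? item "\t").getD []).length ∧
    (PySem.Int.ofStr? (((PySem.Str.split? item "\t").getD []).getD 3 "")).isSome = true ∧
    (PySem.Int.ofStr? (((PySem.Str.split? item "\t").getD []).getD 4 "")).isSome = true ∧
    ((PySem.Str.split? item "\t").getD []).getD 9 "" ∈ sub
instance (L : List String) (sub : List String) (sens : String) : Decidable (Pre_splitbysubsys L sub sens) := by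
  unfold Pre_splitbysubsys; infer_instance

def pvWitness_splitbysubsys : List String × List String × String :=
  (["fig|1.peg\tpeg\tcontig\t12\t3\tx\ty\tz\tname\tsubA"], ["subA"], "forward")

def Spec_splitbysubsys (L : List String) (sub : List String) (sens : String) (out : List (String × List String)) : Prop := out = splitbysubsys_alt L sub sens
instance (L : List String) (sub : List String) (sens : String) (out : List (String × List String)) : Decidable (Spec_splitbysubsys L sub sens out) := by unfold Spec_splitbysubsys; infer_instance

-- ===== CLAIM (what is proved, stated in full; the proofs are below) =====
def Claim_equal_splitbysubsys : Prop := ∀ (L : List String) (sub : List String) (sens : String), Dom_splitbysubsys L sub sens → Pre_splitbysubsys L sub sens → Spec_splitbysubsys L sub sens (splitbysubsys L sub sens)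

-- ===== LEMMAS AND PROOFS =====

-- structural reference form of Python's str.split on a one-character separator
def tsplit (c : Char) : List Char → List Char → List (List Char)
  | [], cur => [cur.reverse]
  | x :: rest, cur => if x = c then cur.reverse :: tsplit c rest [] else tsplit c rest (x :: cur)

theorem go_eq_tsplit (c : Char) : ∀ (l : List Char) (fuel : Nat) (cur : List Char) (acc : List (List Char)),
    l.length < fuel →
    PySem.Chars.splitOn.go [c] fuel l cur acc = acc.reverse ++ tsplit c l cur := by
  intro l
  induction l with
  | nil =>
    intro fuel cur acc h
    cases fuel with
    | zero => omega
    | succ f => simp [PySem.Chars.splitOn.go, tsplit]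
  | cons x rest ih =>
    intro fuel cur acc h
    cases fuel with
    | zero => omega
    | succ f =>
      rw [PySem.Chars.splitOn.go.eq_def]
      by_cases hx : x = c
      · subst hx
        have hgo := ih f [] (cur.reverse :: acc) (by simpa using Nat.lt_of_succ_lt_succ h)
        simp [List.isPrefixOf, hgo, tsplit]
      · have hcx : ¬ c = x := fun hh => hx hh.symm
        have hgo := ih f (x :: cur) acc (by simpa using Nat.lt_of_succ_lt_succ h)
        simp [List.isPrefixOf, hcx, hgo, tsplit, hx]

theorem splitOn_eq_tsplit (c : Char) (s : List Char) :
    PySem.Chars.splitOn s [c] = tsplit c s [] := by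
  unfold PySem.Chars.splitOn
  simpa using go_eq_tsplit c s (s.length + 1) [] [] (by omega)

theorem tsplit_of_not_mem {c : Char} : ∀ {l : List Char}, c ∉ l → ∀ (cur : List Char),
    tsplit c l cur = [cur.reverse ++ l] := by
  intro l
  induction l with
  | nil => intro _ cur; simp [tsplit]
  | cons x rest ih =>
    intro h cur
    have hx : ¬ x = c := fun hh => h (by simp [hh])
    have hr : c ∉ rest := fun hh => h (by simp [hh])
    simp [tsplit, hx, ih hr]

theorem tsplit_append {c : Char} : ∀ {l₁ : List Char}, c ∉ l₁ → ∀ (l₂ cur : List Char),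
    tsplit c (l₁ ++ c :: l₂) cur = (cur.reverse ++ l₁) :: tsplit c l₂ [] := by
  intro l₁
  induction l₁ with
  | nil => intro _ l₂ cur; simp [tsplit]
  | cons x rest ih =>
    intro h l₂ cur
    have hx : ¬ x = c := fun hh => h (by simp [hh])
    have hr : c ∉ rest := fun hh => h (by simp [hh])
    simp [tsplit, hx, ih hr]

theorem not_mem_of_mem_tsplit {c : Char} : ∀ (l cur p : List Char),
    c ∉ cur → p ∈ tsplit c l cur → c ∉ p := by
  intro l
  induction l with
  | nil =>
    intro cur p hcur hp
    simp [tsplit] at hp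
    subst hp; simpa using hcur
  | cons x rest ih =>
    intro cur p hcur hp
    by_cases hx : x = c
    · subst hx
      simp [tsplit] at hp
      rcases hp with rfl | hp
      · simpa using hcur
      · exact ih [] p (by simp) hp
    · simp [tsplit, hx] at hp
      refine ih (x :: cur) p ?_ hp
      intro hmem
      rcases List.mem_cons.mp hmem with hh | hh
      · exact hx hh.symm
      · exact hcur hh

theorem pvSplitTab_eq (s : String) :
    pvSplitTab s = (PySem.Chars.splitOn s.toList ['\t']).map String.ofList := by
  have h : "\t".toList = ['\t'] := by decide
  simp [pvSplitTab, PySem.Str.split?, PySem.Chars.split?, h]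

theorem tabfree_mem {s p : String} (hp : p ∈ pvSplitTab s) : '\t' ∉ p.toList := by
  rw [pvSplitTab_eq, splitOn_eq_tsplit] at hp
  obtain ⟨q, hq, rfl⟩ := List.mem_map.mp hp
  simpa [String.toList_ofList] using not_mem_of_mem_tsplit s.toList [] q (by simp) hq

theorem tabfree_pyGetD (s : String) (i : Int) : '\t' ∉ (PySem.List.pyGetD (pvSplitTab s) i "").toList := by
  by_cases h : PySem.Raise.InRange (pvSplitTab s).length i
  · exact tabfree_mem (PySem.List.pyGetD_mem _ _ h)
  · have h0 : PySem.List.pyGet? (pvSplitTab s) i = none := (PySem.List.pyGet?_eq_none_iff _ _).mpr h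
    rw [show PySem.List.pyGetD (pvSplitTab s) i "" = "" from by simp [PySem.List.pyGetD, h0]]
    decide

theorem pyGetD5_4 (x0 x1 x2 x3 x4 : String) : PySem.List.pyGetD [x0, x1, x2, x3, x4] (4 : Int) "" = x4 := rfl

theorem slice5 (x0 x1 x2 x3 x4 : String) :
    PySem.List.slice [x0, x1, x2, x3, x4] none (some (-1)) = [x0, x1, x2, x3] := by
  rw [PySem.List.slice_to_neg_one]; rfl

theorem pyGetD4_0 (x0 x1 x2 x3 : String) : PySem.List.pyGetD [x0, x1, x2, x3] (0 : Int) "" = x0 := rfl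
theorem pyGetD4_1 (x0 x1 x2 x3 : String) : PySem.List.pyGetD [x0, x1, x2, x3] (1 : Int) "" = x1 := rfl
theorem pyGetD4_2 (x0 x1 x2 x3 : String) : PySem.List.pyGetD [x0, x1, x2, x3] (2 : Int) "" = x2 := rfl
theorem pyGetD4_3 (x0 x1 x2 x3 : String) : PySem.List.pyGetD [x0, x1, x2, x3] (3 : Int) "" = x3 := rfl

theorem split_join5 (a b c d e : String)
    (ha : '\t' ∉ a.toList) (hb : '\t' ∉ b.toList) (hc : '\t' ∉ c.toList)
    (hd : '\t' ∉ d.toList) (he : '\t' ∉ e.toList) :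
    pvSplitTab (PySem.Str.join "\t" [a, b, c, d, e]) = [a, b, c, d, e] := by
  have ht : "\t".toList = ['\t'] := by decide
  have hj : (PySem.Str.join "\t" [a, b, c, d, e]).toList
      = a.toList ++ '\t' :: (b.toList ++ '\t' :: (c.toList ++ '\t' :: (d.toList ++ '\t' :: e.toList))) := by
    rw [PySem.Str.toList_join, ht]
    simp [PySem.Chars.join, List.intercalate]
  rw [pvSplitTab_eq, hj, splitOn_eq_tsplit,
      tsplit_append ha, tsplit_append hb, tsplit_append hc, tsplit_append hd,
      tsplit_of_not_mem he]
  simp [String.ofList_toList]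

theorem build_dicts (sub : List String) : ∀ (cl : PySem.Dict String (List String)) (sc : PySem.Dict String String) (n : Int),
    sub.foldl (fun acc s => (acc.1.insert s ([] : List String), acc.2.1.insert s (PySem.List.pyGetD pvColors acc.2.2 ""), acc.2.2 + 1)) (cl, sc, n)
    = (((PySem.List.enumerate sub n).foldl (fun acc p => (acc.1.insert p.2 ([] : List String), acc.2.insert p.2 (PySem.List.pyGetD pvColors p.1 ""))) (cl, sc)).1,
       ((PySem.List.enumerate sub n).foldl (fun acc p => (acc.1.insert p.2 ([] : List String), acc.2.insert p.2 (PySem.List.pyGetD pvColors p.1 ""))) (cl, sc)).2,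
       n + sub.length) := by
  induction sub with
  | nil => intro cl sc n; simp [PySem.List.enumerate]
  | cons s rest ih =>
    intro cl sc n
    rw [PySem.List.enumerate_cons]
    simp only [List.foldl_cons]
    rw [ih]
    simp only [List.length_cons]
    push_cast
    rw [show n + 1 + (rest.length : Int) = n + ((rest.length : Int) + 1) from by ring]

-- ===== VERDICT (by name: the statement is the Claim_ definition above) =====
set_option maxHeartbeats 1000000 in
theorem splitbysubsys_spec : Claim_equal_splitbysubsys := by
  intro L sub sens _hdom hpre
  obtain ⟨-, hsens, -⟩ := hpre
  unfold Spec_splitbysubsys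
  simp only [splitbysubsys, splitbysubsys_alt]
  rw [show (["gray", "fuchsia", "teal", "purple", "orange", "olive", "silver", "navy", "lime", "marron", "yellow", "aqua", "green"] : List String) = pvColors from rfl]
  rw [build_dicts]
  dsimp only
  have hfold : ∀ s : String, (PySem.Str.split? s "\t").getD [] = pvSplitTab s := fun _ => rfl
  simp only [hfold]
  rw [PySem.List.foldl_append_singleton_eq_map, List.nil_append, List.foldl_map]
  rcases hsens with rfl | hs | hs
  · simp only [List.foldl_nil]
  · subst hs
    refine congrArg (fun d : PySem.Dict String (List String) => d.items) ?_
    refine PySem.List.foldl_congr_mem _ _ _ _ ?_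
    intro acc item _
    simp only [reduceIte]
    by_cases hcond : (PySem.Int.ofStr? (PySem.List.pyGetD (pvSplitTab item) 3 "")).getD 0
        - (PySem.Int.ofStr? (PySem.List.pyGetD (pvSplitTab item) 4 "")).getD 0 < 0
    · have hsj := split_join5 (PySem.List.pyGetD (pvSplitTab item) 3 "") (PySem.List.pyGetD (pvSplitTab item) 4 "")
        (PySem.List.pyGetD (pvSplitTab item) 8 "") "clockwise-arrow\n" (PySem.List.pyGetD (pvSplitTab item) 9 "")
        (tabfree_pyGetD item 3) (tabfree_pyGetD item 4) (tabfree_pyGetD item 8) (by decide) (tabfree_pyGetD item 9)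
      simp only [if_pos hcond, hsj, pyGetD5_4, slice5, pyGetD4_0, pyGetD4_1, pyGetD4_2, pyGetD4_3]
    · have hsj := split_join5 (PySem.List.pyGetD (pvSplitTab item) 4 "") (PySem.List.pyGetD (pvSplitTab item) 3 "")
        (PySem.List.pyGetD (pvSplitTab item) 8 "") "clockwise-arrow\n" (PySem.List.pyGetD (pvSplitTab item) 9 "")
        (tabfree_pyGetD item 4) (tabfree_pyGetD item 3) (tabfree_pyGetD item 8) (by decide) (tabfree_pyGetD item 9)
      simp only [if_neg hcond, hsj, pyGetD5_4, slice5, pyGetD4_0, pyGetD4_1, pyGetD4_2, pyGetD4_3]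
  · subst hs
    refine congrArg (fun d : PySem.Dict String (List String) => d.items) ?_
    refine PySem.List.foldl_congr_mem _ _ _ _ ?_
    intro acc item _
    simp only [if_neg (show ¬ ("reverse" : String) = "forward" from by decide), reduceIte]
    by_cases hcond : (PySem.Int.ofStr? (PySem.List.pyGetD (pvSplitTab item) 3 "")).getD 0
        - (PySem.Int.ofStr? (PySem.List.pyGetD (pvSplitTab item) 4 "")).getD 0 < 0
    · have hsj := split_join5 (PySem.List.pyGetD (pvSplitTab item) 3 "") (PySem.List.pyGetD (pvSplitTab item) 4 "")
        (PySem.List.pyGetD (pvSplitTab item) 8 "") "counterclockwise-arrow\n" (PySem.List.pyGetD (pvSplitTab item) 9 "")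
        (tabfree_pyGetD item 3) (tabfree_pyGetD item 4) (tabfree_pyGetD item 8) (by decide) (tabfree_pyGetD item 9)
      simp only [if_pos hcond, hsj, pyGetD5_4, slice5, pyGetD4_0, pyGetD4_1, pyGetD4_2, pyGetD4_3]
    · have hsj := split_join5 (PySem.List.pyGetD (pvSplitTab item) 4 "") (PySem.List.pyGetD (pvSplitTab item) 3 "")
        (PySem.List.pyGetD (pvSplitTab item) 8 "") "counterclockwise-arrow\n" (PySem.List.pyGetD (pvSplitTab item) 9 "")
        (tabfree_pyGetD item 4) (tabfree_pyGetD item 3) (tabfree_pyGetD item 8) (by decide) (tabfree_pyGetD item 9)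
      simp only [if_neg hcond, hsj, pyGetD5_4, slice5, pyGetD4_0, pyGetD4_1, pyGetD4_2, pyGetD4_3]
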